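-- pv_equiv track=rewrite | github.com/fabriziocosta/EDeN | eden/converter/RNA/FASTA_split.py | _FASTA_split_to_FASTA
-- ===== SOURCE A (Python) =====
-- def _FASTA_split_to_FASTA(data_str_list, options = None):
--     defaults = {'window':70, 'step':20, 'header_only':False}
--     defaults.update(options)
--
--     line_buffer = ''
--     for line in data_str_list:
--         _line = line.strip().upper()
--         if _line:
--             if _line[0] == '>':
--                 #extract string from header
--                 header_str = _line[1:]
--                 seq_len = len(line_buffer)
--                 if seq_len > 0:
--                     #split sequence in windows of size defaults['window'] starting in steps with increment defaults['step']
--                     for start in range(0, seq_len, defaults['step']):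
--                         yield '>%s START: %d WINDOW: %d' % (prev_header_str, start, defaults['window'])
--                         if defaults['header_only'] == False :
--                             subseq = line_buffer[start : start + defaults['window']]
--                             yield subseq
--                 line_buffer = ''
--                 prev_header_str = header_str
--             else:
--                 line_buffer += _line
--     seq_len = len(line_buffer)
--     if seq_len > 0:
--         #split sequence in windows of size defaults['window'] starting in steps with increment defaults['step']
--         for start in range(0, seq_len, defaults['step']):
--             yield '>%s START: %d WINDOW: %d' % (prev_header_str, start, defaults['window'])
--             if defaults['header_only'] == False :
--                 subseq = line_buffer[start : start + defaults['window']]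
--                 yield subseq
-- ===== SOURCE B (Python) =====
-- def _FASTA_split_to_FASTA(data_str_list, options=None):
--     defaults = {'window': 70, 'step': 20, 'header_only': False}
--     defaults.update(options)
--     window = defaults['window']
--     step = defaults['step']
--     header_only = defaults['header_only']
--     # pass 1: split the input lines into (header, sequence) records
--     records = []
--     header = None
--     buf = ''
--     for line in data_str_list:
--         _line = line.strip().upper()
--         if not _line:
--             continue
--         if _line[0] == '>':
--             if buf:
--                 records.append((header, buf))
--                 buf = ''
--             header = _line[1:]
--         else:
--             buf += _line
--     if buf:
--         records.append((header, buf))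
--     # pass 2: emit sliding windows for each record
--     for hdr, seq in records:
--         for start in range(0, len(seq), step):
--             yield '>%s START: %d WINDOW: %d' % (hdr, start, window)
--             if header_only == False:
--                 yield seq[start:start + window]
-- ===== Notes on version B (the rewrite author's own statement) =====
-- stated objective: alternative
-- what changed: A interleaves parsing and window emission in one generator loop; B first collects (header, sequence) records in a parsing pass and then emits the window header/subsequence lines in a second pass over the records.
import Mathlib
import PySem

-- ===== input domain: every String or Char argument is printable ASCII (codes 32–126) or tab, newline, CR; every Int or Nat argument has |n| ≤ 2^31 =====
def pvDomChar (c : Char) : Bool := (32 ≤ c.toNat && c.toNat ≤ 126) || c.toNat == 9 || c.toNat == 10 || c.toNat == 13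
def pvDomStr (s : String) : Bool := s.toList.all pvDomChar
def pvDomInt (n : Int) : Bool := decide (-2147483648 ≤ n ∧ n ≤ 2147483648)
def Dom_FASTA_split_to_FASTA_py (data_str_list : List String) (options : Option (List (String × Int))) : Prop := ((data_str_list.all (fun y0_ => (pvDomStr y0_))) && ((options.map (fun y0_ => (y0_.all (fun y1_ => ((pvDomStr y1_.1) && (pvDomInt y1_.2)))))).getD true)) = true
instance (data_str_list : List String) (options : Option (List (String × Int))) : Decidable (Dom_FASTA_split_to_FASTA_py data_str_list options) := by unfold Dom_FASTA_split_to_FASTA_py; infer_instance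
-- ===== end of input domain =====

-- B replaces A's single interleaved generator loop by a two-pass decomposition: pass 1 collects
-- (header, sequence) records, pass 2 generates the window lines from the records (objective: alternative).

-- ===== PORT A =====
-- defaults = {'window':70,'step':20,'header_only':False}; defaults.update(options); read the three keys.
-- header_only is modelled as Int (False = 0): the only use is '== False', which for Python ints holds iff the value is 0.
-- options = None makes Python raise TypeError in defaults.update(None); excluded by Pre_, the port returns the defaults there.
def pvOptsA (options : Option (List (String × Int))) : Int × Int × Int :=
  match options with
  | none => (70, 20, 0)
  | some opts =>
      let d := opts.foldl (fun (d : PySem.Dict String Int) kv => d.insert kv.1 kv.2)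
        (PySem.Dict.ofList [("window", 70), ("step", 20), ("header_only", 0)])
      (d.getD "window" 70, d.getD "step" 20, d.getD "header_only" 0)

-- the inner 'for start in range(0, seq_len, step): yield header-line; if not header_only: yield subseq'
def pvWinA (window step headerOnly : Int) (hdr seqc : List Char) : List String :=
  (PySem.List.pyRange 0 (PySem.Chars.len seqc) step).flatMap (fun start =>
    String.ofList ('>' :: (hdr ++ (" START: ".toList ++ (PySem.Int.toChars start ++
        (" WINDOW: ".toList ++ PySem.Int.toChars window)))))
    :: (if headerOnly == 0 then
          [String.ofList (PySem.Chars.slice seqc (some start) (some (start + window)))]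
        else []))

-- A's main loop; the EOF flush is the [] case. prev_header_str is unbound until the first header in
-- Python (reading it raises NameError — excluded by Pre_); the port carries it as a List Char from the start.
def pvLoopA (w s h : Int) (lines : List String) (buf prev : List Char) : List String :=
  match lines with
  | [] => if 0 < PySem.Chars.len buf then pvWinA w s h prev buf else []
  | l :: ls =>
      match PySem.Chars.upper (PySem.Chars.strip l.toList) with
      | [] => pvLoopA w s h ls buf prev
      | c :: rest =>
          if c = '>' then
            (if 0 < PySem.Chars.len buf then pvWinA w s h prev buf else []) ++ pvLoopA w s h ls [] rest
          else
            pvLoopA w s h ls (buf ++ (c :: rest)) prev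

-- Python B's initial 'header = None' prints as "None" in the header line; the ports start from that placeholder
-- (only reachable when sequence text precedes any header, where Python A raises NameError — outside Pre_).
def FASTA_split_to_FASTA_py (data_str_list : List String) (options : Option (List (String × Int))) : List String :=
  let t := pvOptsA options
  pvLoopA t.1 t.2.1 t.2.2 data_str_list [] ("None".toList)

-- ===== PORT B =====
def pvOptsB (options : Option (List (String × Int))) : Int × Int × Int :=
  match options with
  | none => (70, 20, 0)
  | some opts =>
      let d := opts.foldl (fun (d : PySem.Dict String Int) kv => d.insert kv.1 kv.2)
        (PySem.Dict.ofList [("window", 70), ("step", 20), ("header_only", 0)])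
      (d.getD "window" 70, d.getD "step" 20, d.getD "header_only" 0)

-- pass 1: collect the (header, sequence) records (records.append ≡ emit in front of the recursion's rest)
def pvPass1 (lines : List String) (hdr buf : List Char) : List (List Char × List Char) :=
  match lines with
  | [] => if buf.isEmpty then [] else [(hdr, buf)]
  | l :: ls =>
      match PySem.Chars.upper (PySem.Chars.strip l.toList) with
      | [] => pvPass1 ls hdr buf
      | c :: rest =>
          if c = '>' then
            (if buf.isEmpty then [] else [(hdr, buf)]) ++ pvPass1 ls rest []
          else
            pvPass1 ls hdr (buf ++ (c :: rest))

-- pass 2 inner loop: windows of one record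
def pvWinB (window step headerOnly : Int) (hdr seqc : List Char) : List String :=
  (PySem.List.pyRange 0 (PySem.Chars.len seqc) step).flatMap (fun start =>
    String.ofList ('>' :: (hdr ++ (" START: ".toList ++ (PySem.Int.toChars start ++
        (" WINDOW: ".toList ++ PySem.Int.toChars window)))))
    :: (if headerOnly == 0 then
          [String.ofList (PySem.Chars.slice seqc (some start) (some (start + window)))]
        else []))

def FASTA_split_to_FASTA_py_alt (data_str_list : List String) (options : Option (List (String × Int))) : List String :=
  let t := pvOptsB options
  (pvPass1 data_str_list ("None".toList) []).flatMap (fun r => pvWinB t.1 t.2.1 t.2.2 r.1 r.2)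

-- ===== PRECONDITION & SPEC =====
def pvStripped (l : String) : List Char := PySem.Chars.strip l.toList
def pvIsSeqLine (l : String) : Bool := !(pvStripped l).isEmpty && (pvStripped l).head? != some '>'
-- the effective 'step' after defaults.update(options): last 'step' binding, default 20
def pvStepOf (options : Option (List (String × Int))) : Int :=
  match options with
  | none => 20
  | some opts => opts.foldl (fun v kv => if kv.1 = "step" then kv.2 else v) 20

-- Pre_ excludes exactly the inputs on which Python A raises: options = None (TypeError in update),
-- a window split actually attempted with step 0 (ValueError from range), and a positive-step split of
-- sequence text that precedes any header (NameError/UnboundLocalError on prev_header_str).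
def Pre_FASTA_split_to_FASTA_py (data_str_list : List String) (options : Option (List (String × Int))) : Prop :=
  options.isSome = true ∧
  ((data_str_list.all (fun l => !(pvIsSeqLine l))) = true ∨
   (pvStepOf options ≠ 0 ∧
    (pvStepOf options < 0 ∨
     ((data_str_list.find? (fun l => !(pvStripped l).isEmpty)).all
        (fun l => (pvStripped l).head? == some '>')) = true)))
instance (data_str_list : List String) (options : Option (List (String × Int))) : Decidable (Pre_FASTA_split_to_FASTA_py data_str_list options) := by unfold Pre_FASTA_split_to_FASTA_py; infer_instance

def pvWitness_FASTA_split_to_FASTA_py : List String × (Option (List (String × Int))) :=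
  ([">h1", "acgt", "ggtt", ">h2", "tt"], some [("step", 3), ("window", 4)])

def Spec_FASTA_split_to_FASTA_py (data_str_list : List String) (options : Option (List (String × Int))) (out : List String) : Prop := out = FASTA_split_to_FASTA_py_alt data_str_list options
instance (data_str_list : List String) (options : Option (List (String × Int))) (out : List String) : Decidable (Spec_FASTA_split_to_FASTA_py data_str_list options out) := by unfold Spec_FASTA_split_to_FASTA_py; infer_instance

-- ===== CLAIM (what is proved, stated in full; the proofs are below) =====
def Claim_equal_FASTA_split_to_FASTA_py : Prop := ∀ (data_str_list : List String) (options : Option (List (String × Int))), Dom_FASTA_split_to_FASTA_py data_str_list options → Pre_FASTA_split_to_FASTA_py data_str_list options → Spec_FASTA_split_to_FASTA_py data_str_list options (FASTA_split_to_FASTA_py data_str_list options)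
-- ===== LEMMAS AND PROOFS =====

lemma pvWin_eq : pvWinA = pvWinB := rfl

lemma pvOpts_eq : pvOptsA = pvOptsB := rfl

-- A's interleaved loop equals: collect the records first, then window each record.
lemma pvLoop_eq (w s h : Int) : ∀ (lines : List String) (buf prev : List Char),
    pvLoopA w s h lines buf prev
      = (pvPass1 lines prev buf).flatMap (fun r => pvWinB w s h r.1 r.2) := by
  intro lines
  induction lines with
  | nil =>
      intro buf prev
      cases buf with
      | nil => simp [pvLoopA, pvPass1, PySem.Chars.len]
      | cons x xs => simp [pvLoopA, pvPass1, PySem.Chars.len, pvWin_eq]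
  | cons l ls ih =>
      intro buf prev
      cases hl : PySem.Chars.upper (PySem.Chars.strip l.toList) with
      | nil => simp [pvLoopA, pvPass1, hl, ih]
      | cons c rest =>
          by_cases hc : c = '>'
          · cases buf with
            | nil => simp [pvLoopA, pvPass1, hl, hc, ih, PySem.Chars.len]
            | cons x xs =>
                simp [pvLoopA, pvPass1, hl, hc, ih, PySem.Chars.len, pvWin_eq]
          · simp [pvLoopA, pvPass1, hl, hc, ih]

-- ===== VERDICT (by name: the statement is the Claim_ definition above) =====
theorem FASTA_split_to_FASTA_py_spec : Claim_equal_FASTA_split_to_FASTA_py := by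
  intro data options _ _
  unfold Spec_FASTA_split_to_FASTA_py FASTA_split_to_FASTA_py FASTA_split_to_FASTA_py_alt
  rw [← pvOpts_eq]
  exact pvLoop_eq _ _ _ data [] ("None".toList)
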